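-- pv_equiv track=rewrite | github.com/anisul770/computer_science | LAB 07/Add without minimum/main.py | sum_without_smallest
-- ===== SOURCE A (Python) =====
-- def sum_without_smallest(v):
--     index_smallest = v.index(min(v))
--     sum_ = 0
--     if len(v) == 1:
--         sum_ = v[0]
--     else:
--         for i in range(len(v)):
--             if i == index_smallest:
--                 continue
--             else:
--                 sum_ = sum_ + v[i]
--
--     return sum_
-- ===== SOURCE B (Python) =====
-- def sum_without_smallest(v):
--     if len(v) == 1:
--         return v[0]
--     return sum(v) - min(v)
-- ===== Notes on version B (the rewrite author's own statement) =====
-- stated objective: simpler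
-- what changed: Replaces the index-of-min search and the element-skipping loop by the closed form sum(v) - min(v), keeping the singleton branch.
import Mathlib
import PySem

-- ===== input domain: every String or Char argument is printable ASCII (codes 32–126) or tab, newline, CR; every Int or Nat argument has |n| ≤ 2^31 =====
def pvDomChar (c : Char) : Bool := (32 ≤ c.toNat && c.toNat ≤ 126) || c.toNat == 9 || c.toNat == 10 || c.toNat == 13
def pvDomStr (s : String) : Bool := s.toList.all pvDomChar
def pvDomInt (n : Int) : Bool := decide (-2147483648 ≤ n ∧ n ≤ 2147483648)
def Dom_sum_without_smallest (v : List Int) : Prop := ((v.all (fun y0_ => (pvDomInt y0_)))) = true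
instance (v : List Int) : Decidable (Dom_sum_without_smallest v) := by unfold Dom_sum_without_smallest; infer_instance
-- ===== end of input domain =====

-- B replaces A's index-of-min search plus skip-that-index summation loop by the
-- closed form sum(v) - min(v) (keeping A's len==1 branch); objective: simpler.

-- ===== PORT A =====
def sum_without_smallest (v : List Int) : Int :=
  let index_smallest : Nat :=
    (PySem.List.index? v ((PySem.List.min? v (fun x => x)).getD 0)).getD 0
  if v.length == 1 then
    PySem.List.pyGetD v 0 0
  else
    (PySem.List.pyRange 0 (v.length : Int) 1).foldl
      (fun sum_ i => if i == (index_smallest : Int) then sum_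
                     else sum_ + PySem.List.pyGetD v i 0) 0

-- ===== PORT B =====
def sum_without_smallest_alt (v : List Int) : Int :=
  if v.length == 1 then
    PySem.List.pyGetD v 0 0
  else
    v.sum - (PySem.List.min? v (fun x => x)).getD 0

-- ===== PRECONDITION & SPEC =====
-- Pre_ excludes only the empty list, on which Python's min(v) raises ValueError (in both A and B).
def Pre_sum_without_smallest (v : List Int) : Prop := v ≠ []
instance (v : List Int) : Decidable (Pre_sum_without_smallest v) := by
  unfold Pre_sum_without_smallest; infer_instance
def pvWitness_sum_without_smallest : List Int := [3, 1, 2]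

def Spec_sum_without_smallest (v : List Int) (out : Int) : Prop := out = sum_without_smallest_alt v
instance (v : List Int) (out : Int) : Decidable (Spec_sum_without_smallest v out) := by unfold Spec_sum_without_smallest; infer_instance

-- ===== CLAIM (what is proved, stated in full; the proofs are below) =====
def Claim_equal_sum_without_smallest : Prop := ∀ (v : List Int), Dom_sum_without_smallest v → Pre_sum_without_smallest v → Spec_sum_without_smallest v (sum_without_smallest v)

-- ===== LEMMAS AND PROOFS =====

-- Skip-index summation over range(n), n ≤ len v: partial sums minus v[j] once passed.
lemma aux_skip_take (v : List Int) (j : Nat) (hj : j < v.length) :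
    ∀ n, n ≤ v.length →
    (List.range n).foldl (fun (s : Int) (k : Nat) =>
        if ((k:Int) == (j:Int)) then s else s + PySem.List.pyGetD v (k:Int) 0) 0
      = (v.take n).sum - (if j < n then v[j] else 0) := by
  intro n
  induction n with
  | zero => simp
  | succ m ih =>
    intro hm
    rw [List.range_succ, List.foldl_append, ih (by omega)]
    simp only [List.foldl_cons, List.foldl_nil, PySem.List.pyGetD_natCast,
      List.sum_take_succ v m (by omega)]
    by_cases h : m = j
    · subst h; simp
    · have : ((m:Int) == (j:Int)) = false := by simp; omega
      rw [this]
      simp [(by omega : m < v.length)]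
      split_ifs <;> [skip; omega; omega; skip] <;> ring

-- A's loop over range(len(v)) skipping index j computes sum(v) - v[j].
lemma foldl_skip_index (v : List Int) (j : Nat) (hj : j < v.length) :
    (PySem.List.pyRange 0 (v.length : Int) 1).foldl
      (fun s i => if i == (j : Int) then s else s + PySem.List.pyGetD v i 0) 0
    = v.sum - v[j] := by
  rw [PySem.List.pyRange_one]
  simp only [zero_add, Int.sub_zero, Int.toNat_natCast, List.foldl_map]
  rw [aux_skip_take v j hj v.length le_rfl]
  simp [hj]

-- ===== VERDICT (by name: the statement is the Claim_ definition above) =====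
theorem sum_without_smallest_spec : Claim_equal_sum_without_smallest := by
  intro v _ hv
  unfold Spec_sum_without_smallest
  obtain ⟨m, hm⟩ : ∃ m, PySem.List.min? v (fun x => x) = some m := by
    cases h : PySem.List.min? v (fun x => x)
    · exact absurd ((PySem.List.min?_eq_none_iff v _).mp h) hv
    · exact ⟨_, rfl⟩
  have hmem : m ∈ v := PySem.List.min?_mem hm
  obtain ⟨k, hk⟩ : ∃ k, PySem.List.index? v m = some k := by
    cases h : PySem.List.index? v m
    · exact absurd hmem ((PySem.List.index?_eq_none_iff v m).mp h)
    · exact ⟨_, rfl⟩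
  obtain ⟨hklt, hvk, -⟩ := PySem.List.getElem_of_index?_eq_some hk
  unfold sum_without_smallest sum_without_smallest_alt
  simp only [hm, Option.getD_some, hk]
  split
  · rfl
  · rw [foldl_skip_index v k hklt, hvk]
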